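-- pv_equiv track=rewrite | github.com/hong0708/algorithm | 프로그래머스_1/비밀지도.py | solution
-- ===== SOURCE A (Python) =====
-- def solution(n, arr1, arr2):
--     answer = []
--
--     for i in range(n):
--         a = arr1[i] | arr2[i]
--         j = n - 1
--         temp = ""
--         while (j >= 0):
--             if a % 2 == 1:
--                 temp = "#" + temp
--             elif a % 2 == 0:
--                 temp = " " + temp
--             a //= 2
--             j -= 1
--         answer.append(str(temp))
--     return answer
-- ===== SOURCE B (Python) =====
-- def solution(n, arr1, arr2):
--     tr = str.maketrans('10', '# ')
--     answer = []
--     for i in range(n):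
--         a = (arr1[i] | arr2[i]) % (1 << n)
--         answer.append(format(a, '0{}b'.format(n)).translate(tr))
--     return answer
-- ===== Notes on version B (the rewrite author's own statement) =====
-- stated objective: faster
-- what changed: Replaces A's manual per-bit while loop (extracting bits LSB-first with %2 and //2, prepending one character per bit) by a single n-bit truncation (a % (1<<n)) plus one binary-format conversion (format(a, '0nb')) and a character translation '1'->'#', '0'->' '; the per-bit Python-level loop disappears into C-level formatting.
import Mathlib
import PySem

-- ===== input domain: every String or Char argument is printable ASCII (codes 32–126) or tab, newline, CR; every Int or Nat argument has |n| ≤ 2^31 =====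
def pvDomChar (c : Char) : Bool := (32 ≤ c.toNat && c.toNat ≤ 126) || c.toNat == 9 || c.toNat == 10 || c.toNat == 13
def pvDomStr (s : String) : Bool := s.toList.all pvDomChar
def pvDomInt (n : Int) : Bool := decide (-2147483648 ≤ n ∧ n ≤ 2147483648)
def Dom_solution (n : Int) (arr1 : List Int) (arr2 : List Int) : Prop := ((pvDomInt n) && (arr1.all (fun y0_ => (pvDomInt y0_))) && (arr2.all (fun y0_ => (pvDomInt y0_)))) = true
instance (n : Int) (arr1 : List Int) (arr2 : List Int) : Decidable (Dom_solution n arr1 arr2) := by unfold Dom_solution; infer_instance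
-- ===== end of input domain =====

-- B renders each row with a single binary-format conversion plus character translation instead of
-- A's per-bit while loop (measurably faster at large n in a timing run).

-- ===== PORT A =====
-- the inner 'while j >= 0' loop; temp is the row string carried as List Char
-- ("#" + temp prepends one character, which is exactly '#' :: temp); fuel = number of
-- remaining iterations, i.e. j+1, so the loop starting at j = n-1 gets fuel n.toNat
def rowA : Nat → Int → List Char → List Char
  | 0, _, temp => temp
  | j + 1, a, temp =>
      rowA j (PySem.Int.floordiv a 2)
        (if PySem.Int.mod a 2 = 1 then '#' :: temp
         else if PySem.Int.mod a 2 = 0 then ' ' :: temp else temp)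

def solution (n : Int) (arr1 : List Int) (arr2 : List Int) : List String :=
  (PySem.List.pyRange 0 n).foldl
    (fun answer i =>
      answer ++ [String.ofList (rowA n.toNat
        (PySem.Int.bor (PySem.List.pyGetD arr1 i 0) (PySem.List.pyGetD arr2 i 0)) [])])
    []

-- ===== PORT B =====
-- format(m, 'b') for m ≥ 1, MSB first (hand port of Python's binary formatting, exact for m ≥ 0
-- together with the m = 0 case handled in fmtBin)
def binChars : Nat → List Char
  | 0 => []
  | m + 1 => binChars ((m + 1) / 2) ++ [if (m + 1) % 2 = 1 then '1' else '0']
decreasing_by exact Nat.div_lt_self (Nat.succ_pos m) one_lt_two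

-- format(m, '0{w}b') for m ≥ 0: minimal binary digits, left-padded with '0' to width w
def fmtBin (w : Nat) (m : Nat) : List Char :=
  let s := if m = 0 then ['0'] else binChars m
  List.replicate (w - s.length) '0' ++ s

-- str.maketrans('10', '# ') applied per character
def trB (c : Char) : Char := if c = '1' then '#' else if c = '0' then ' ' else c

def solution_alt (n : Int) (arr1 : List Int) (arr2 : List Int) : List String :=
  (PySem.List.pyRange 0 n).foldl
    (fun answer i =>
      let a := PySem.Int.mod
        (PySem.Int.bor (PySem.List.pyGetD arr1 i 0) (PySem.List.pyGetD arr2 i 0))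
        ((1 : Int) <<< n.toNat)
      answer ++ [String.ofList ((fmtBin n.toNat a.toNat).map trB)])
    []

-- ===== PRECONDITION & SPEC =====
-- Python A raises IndexError when some i < n is out of range of arr1 or arr2; nothing else raises.
def Pre_solution (n : Int) (arr1 : List Int) (arr2 : List Int) : Prop :=
  n ≤ (arr1.length : Int) ∧ n ≤ (arr2.length : Int)
instance (n : Int) (arr1 : List Int) (arr2 : List Int) : Decidable (Pre_solution n arr1 arr2) := by
  unfold Pre_solution; infer_instance

def pvWitness_solution : Int × List Int × List Int := (2, [9, 20], [30, 1])

def Spec_solution (n : Int) (arr1 : List Int) (arr2 : List Int) (out : List String) : Prop := out = solution_alt n arr1 arr2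
instance (n : Int) (arr1 : List Int) (arr2 : List Int) (out : List String) : Decidable (Spec_solution n arr1 arr2 out) := by unfold Spec_solution; infer_instance

-- ===== CLAIM (what is proved, stated in full; the proofs are below) =====
def Claim_equal_solution : Prop := ∀ (n : Int) (arr1 : List Int) (arr2 : List Int), Dom_solution n arr1 arr2 → Pre_solution n arr1 arr2 → Spec_solution n arr1 arr2 (solution n arr1 arr2)

-- ===== LEMMAS AND PROOFS =====

-- the characters rowA prepends, in final (MSB-first) order
def bitsF : Nat → Int → List Char
  | 0, _ => []
  | k + 1, a => bitsF k (PySem.Int.floordiv a 2) ++ [if PySem.Int.mod a 2 = 1 then '#' else ' ']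

theorem rowA_eq_bitsF : ∀ (k : Nat) (a : Int) (temp : List Char),
    rowA k a temp = bitsF k a ++ temp := by
  intro k
  induction k with
  | zero => intro a temp; simp [rowA, bitsF]
  | succ k ih =>
      intro a temp
      rw [rowA, bitsF, ih, List.append_assoc]
      rcases PySem.Int.mod_two_eq a with h | h <;> rw [h] <;> simp

-- the same bits as '1'/'0' digits, read off a Nat
def bitsN : Nat → Nat → List Char
  | 0, _ => []
  | k + 1, m => bitsN k (m / 2) ++ [if m % 2 = 1 then '1' else '0']

theorem emod_pow_succ (k : Nat) (a : Int) :
    a % 2 ^ (k + 1) = 2 * (a / 2 % 2 ^ k) + a % 2 := by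
  have hP : (0 : Int) < 2 ^ k := by positivity
  have h1 : a = 2 * 2 ^ k * (a / 2 / 2 ^ k) + (2 * (a / 2 % 2 ^ k) + a % 2) := by
    have e1 : (2 : Int) * (a / 2) + a % 2 = a := Int.mul_ediv_add_emod a 2
    have e2 : (2 : Int) ^ k * (a / 2 / 2 ^ k) + a / 2 % 2 ^ k = a / 2 := Int.mul_ediv_add_emod (a / 2) (2 ^ k)
    nlinarith [e1, e2]
  have hx0 : 0 ≤ a / 2 % 2 ^ k := Int.emod_nonneg _ (by positivity)
  have hx1 : a / 2 % 2 ^ k < 2 ^ k := Int.emod_lt_of_pos _ hP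
  have hy0 : 0 ≤ a % 2 := Int.emod_nonneg _ (by norm_num)
  have hy1 : a % 2 < 2 := Int.emod_lt_of_pos _ (by norm_num)
  calc a % 2 ^ (k + 1)
      = (2 * (a / 2 % 2 ^ k) + a % 2 + 2 ^ (k + 1) * (a / 2 / 2 ^ k)) % 2 ^ (k + 1) := by
        congr 1
        rw [pow_succ]
        nlinarith [h1]
    _ = (2 * (a / 2 % 2 ^ k) + a % 2) % 2 ^ (k + 1) := Int.add_mul_emod_self_left _ _ _
    _ = 2 * (a / 2 % 2 ^ k) + a % 2 := by
        apply Int.emod_eq_of_lt (by omega)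
        rw [pow_succ]
        omega

theorem bitsF_eq_bitsN : ∀ (k : Nat) (a : Int),
    bitsF k a = (bitsN k (a % 2 ^ k).toNat).map trB := by
  intro k
  induction k with
  | zero => intro a; simp [bitsF, bitsN]
  | succ k ih =>
      intro a
      have hfd : PySem.Int.floordiv a 2 = a / 2 := PySem.Int.floordiv_eq_ediv_of_pos (by norm_num)
      have hmd : PySem.Int.mod a 2 = a % 2 := PySem.Int.mod_eq_emod_of_pos (by norm_num)
      have he := emod_pow_succ k a
      have hx0 : 0 ≤ a / 2 % 2 ^ k := Int.emod_nonneg _ (by positivity)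
      have hy0 : 0 ≤ a % 2 := Int.emod_nonneg _ (by norm_num)
      have hy1 : a % 2 < 2 := Int.emod_lt_of_pos _ (by norm_num)
      have hdiv : (a % 2 ^ (k + 1)).toNat / 2 = (a / 2 % 2 ^ k).toNat := by omega
      have hmod : (a % 2 ^ (k + 1)).toNat % 2 = (a % 2).toNat := by omega
      have hmod1 : ((a % 2 ^ (k + 1)).toNat % 2 = 1) ↔ (a % 2 = 1) := by omega
      simp only [bitsF, bitsN, hfd, hmd, ih (a / 2), hdiv, List.map_append, List.map]
      congr 1
      by_cases h : a % 2 = 1 <;> simp [h, hmod1, trB]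

theorem bitsN_zero_eq : ∀ (k : Nat), bitsN k 0 = List.replicate k '0' := by
  intro k
  induction k with
  | zero => simp [bitsN]
  | succ k ih => simpa [bitsN, ih] using (List.replicate_succ' (n := k) (a := '0')).symm

theorem bitsN_eq_fmtBin : ∀ (k m : Nat), m < 2 ^ k → 1 ≤ k → bitsN k m = fmtBin k m := by
  intro k
  induction k with
  | zero => intro m _ hk; omega
  | succ k ih =>
      intro m hm _
      by_cases h0 : m = 0
      · subst h0
        rw [bitsN_zero_eq]
        simp [fmtBin, List.replicate_succ' (n := k) (a := '0')]
      by_cases h1 : m = 1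
      · subst h1
        show bitsN k (1 / 2) ++ [if 1 % 2 = 1 then '1' else '0'] = fmtBin (k + 1) 1
        norm_num [bitsN_zero_eq, fmtBin, binChars]
      · have hm2 : 2 ≤ m := by omega
        have hk1 : 1 ≤ k := by
          by_contra h
          have hk0 : k = 0 := by omega
          subst hk0
          norm_num at hm
          omega
        have hhalf : m / 2 < 2 ^ k := by
          rw [pow_succ] at hm
          omega
        have hhalf0 : m / 2 ≠ 0 := by omega
        obtain ⟨t, rfl⟩ : ∃ t, m = t + 2 := ⟨m - 2, by omega⟩
        have hbin : binChars (t + 2) = binChars ((t + 2) / 2) ++ [if (t + 2) % 2 = 1 then '1' else '0'] := by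
          rw [show t + 2 = (t + 1) + 1 by ring, binChars]
        rw [show bitsN (k + 1) (t + 2) = bitsN k ((t + 2) / 2) ++ [if (t + 2) % 2 = 1 then '1' else '0'] from rfl]
        rw [ih ((t + 2) / 2) hhalf hk1]
        simp only [fmtBin, hhalf0, if_neg (by omega : ¬ t + 2 = 0), hbin]
        rw [List.length_append]
        simp only [List.length_singleton]
        rw [show k + 1 - ((binChars ((t + 2) / 2)).length + 1) = k - (binChars ((t + 2) / 2)).length by omega]
        simp [List.append_assoc]

-- one row: A's bit loop with fuel k equals B's formatted-and-translated row, for k ≥ 1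
theorem row_eq (k : Nat) (hk : 1 ≤ k) (a : Int) :
    rowA k a [] = (fmtBin k ((PySem.Int.mod a ((1 : Int) <<< k)).toNat)).map trB := by
  have hsh : (1 : Int) <<< k = 2 ^ k := by simp [Int.shiftLeft_eq]
  have hP : (0 : Int) < 2 ^ k := by positivity
  have hmd : PySem.Int.mod a ((1 : Int) <<< k) = a % 2 ^ k := by
    rw [hsh]; exact PySem.Int.mod_eq_emod_of_pos hP
  have hlt : (a % 2 ^ k).toNat < 2 ^ k := by
    have h1 : a % 2 ^ k < 2 ^ k := Int.emod_lt_of_pos _ hP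
    have h2 : 0 ≤ a % 2 ^ k := Int.emod_nonneg _ (by positivity)
    have hcast : ((2 : Int) ^ k) = ((2 ^ k : Nat) : Int) := by push_cast; ring
    omega
  rw [rowA_eq_bitsF, List.append_nil, bitsF_eq_bitsN, bitsN_eq_fmtBin _ _ hlt hk, hmd]

-- ===== VERDICT (by name: the statement is the Claim_ definition above) =====
theorem solution_spec : Claim_equal_solution := by
  intro n arr1 arr2 _ _
  show solution n arr1 arr2 = solution_alt n arr1 arr2
  unfold solution solution_alt
  apply PySem.List.foldl_congr_mem
  intro acc i hi
  have hi' := (PySem.List.mem_pyRange_one).1 hi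
  have hn : 1 ≤ n.toNat := by omega
  show acc ++ _ = acc ++ _
  congr 2
  exact congrArg String.ofList (row_eq n.toNat hn _)
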